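-- pv_equiv track=rewrite | github.com/thulard/TTC_fun | app.py | split_max
-- ===== SOURCE A (Python) =====
-- def split_max(lines, max):
--     '''
--     Return a split list of lines based on a max numbers of characters
--     '''
--     part = list()
--     rest = list()
--     len_check=0
--
--     for line in lines:
--         newline = part + [line]
--         if len(','.join(newline)) <= max and len_check==0:
--             part.append(line)
--         else:
--             len_check=1
--             rest.append(line)
--
--     return rest, part
-- ===== SOURCE B (Python) =====
-- def split_max(lines, max):
--     '''
--     Return a split list of lines based on a max numbers of characters
--     '''
--     cum = 0
--     k = 0
--     for line in lines:
--         cum += len(line) + (1 if k > 0 else 0)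
--         if cum > max:
--             break
--         k += 1
--     return lines[k:], lines[:k]
-- ===== Notes on version B (the rewrite author's own statement) =====
-- stated objective: faster
-- what changed: Replace A's repeated ','.join of the growing prefix plus a part/rest accumulator and a len_check flag by a single pass that keeps only the running joined length as an integer and a split index k, then slices lines[k:]/lines[:k] once at the end.
import Mathlib
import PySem

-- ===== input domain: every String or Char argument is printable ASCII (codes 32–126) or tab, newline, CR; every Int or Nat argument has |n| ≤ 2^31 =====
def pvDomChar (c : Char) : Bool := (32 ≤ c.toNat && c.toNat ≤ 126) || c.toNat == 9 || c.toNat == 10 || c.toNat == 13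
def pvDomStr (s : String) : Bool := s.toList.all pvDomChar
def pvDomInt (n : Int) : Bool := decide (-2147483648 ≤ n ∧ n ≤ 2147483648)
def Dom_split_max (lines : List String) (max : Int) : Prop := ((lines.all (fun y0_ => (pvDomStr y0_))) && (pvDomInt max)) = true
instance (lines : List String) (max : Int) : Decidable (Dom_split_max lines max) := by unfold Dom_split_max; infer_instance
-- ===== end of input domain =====

-- B replaces A's repeated ','.join of the growing prefix by a single pass tracking the running
-- joined length and a split index, slicing once at the end (objective: faster).


-- ===== PORT A =====
-- A: fold over lines carrying (part, rest, len_check), re-joining part ++ [line] each step.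
def splitMaxStep (max : Int) (st : List String × List String × Int) (line : String) :
    List String × List String × Int :=
  let part := st.1
  let rest := st.2.1
  let len_check := st.2.2
  let newline := part ++ [line]
  if PySem.Str.len (PySem.Str.join "," newline) ≤ max ∧ len_check = 0 then
    (part ++ [line], rest, len_check)
  else
    (part, rest ++ [line], 1)

def split_max (lines : List String) (max : Int) : List String × List String :=
  let st := lines.foldl (splitMaxStep max) ([], [], 0)
  (st.2.1, st.1)

-- ===== PORT B =====
-- B: one pass keeping only the running joined length `cum` and the split index `k`.
def splitMaxAltLoop (max : Int) : List String → Int → Nat → Nat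
  | [], _, k => k
  | line :: ls, cum, k =>
    let cum' := cum + PySem.Str.len line + (if k > 0 then 1 else 0)
    if cum' > max then k else splitMaxAltLoop max ls cum' (k + 1)

def split_max_alt (lines : List String) (max : Int) : List String × List String :=
  let k := splitMaxAltLoop max lines 0 0
  (lines.drop k, lines.take k)

-- ===== PRECONDITION & SPEC =====
def Spec_split_max (lines : List String) (max : Int) (out : List String × List String) : Prop := out = split_max_alt lines max
instance (lines : List String) (max : Int) (out : List String × List String) : Decidable (Spec_split_max lines max out) := by unfold Spec_split_max; infer_instance

-- ===== CLAIM (what is proved, stated in full; the proofs are below) =====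
def Claim_equal_split_max : Prop := ∀ (lines : List String) (max : Int), Dom_split_max lines max → Spec_split_max lines max (split_max lines max)

-- ===== LEMMAS AND PROOFS =====

-- length of ','-join grows by x.length plus one comma unless the prefix was empty
theorem join_len_append (ps : List (List Char)) (x : List Char) :
    (PySem.Chars.join [','] (ps ++ [x])).length
      = (PySem.Chars.join [','] ps).length + x.length + (if ps = [] then 0 else 1) := by
  induction ps with
  | nil => simp [PySem.Chars.join_nil, PySem.Chars.join_singleton]
  | cons p ps ih =>
    cases ps with
    | nil =>
      simp [PySem.Chars.join_singleton, PySem.Chars.join_cons_cons]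
      omega
    | cons q rest =>
      have h1 : (p :: q :: rest) ++ [x] = p :: ((q :: rest) ++ [x]) := by simp
      rw [h1, List.cons_append, PySem.Chars.join_cons_cons, PySem.Chars.join_cons_cons]
      have h2 := ih
      simp only [List.cons_append] at h2
      simp [h2]
      omega

theorem str_join_len_append (part : List String) (line : String) :
    PySem.Str.len (PySem.Str.join "," (part ++ [line]))
      = PySem.Str.len (PySem.Str.join "," part) + PySem.Str.len line
        + (if part = [] then 0 else 1) := by
  simp only [PySem.Str.len_eq, PySem.Str.toList_join, List.map_append, List.map_cons,
    List.map_nil]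
  have h : (String.toList ",") = [','] := rfl
  rw [h, join_len_append]
  by_cases hp : part = []
  · simp [hp]
  · have hne : (List.map String.toList part) ≠ [] := by simp [hp]
    simp [hp, hne]

theorem splitMaxAltLoop_ge (max : Int) :
    ∀ (ls : List String) (cum : Int) (k : Nat), k ≤ splitMaxAltLoop max ls cum k := by
  intro ls
  induction ls with
  | nil => intro cum k; simp [splitMaxAltLoop]
  | cons line ls ih =>
    intro cum k
    simp only [splitMaxAltLoop]
    by_cases h : cum + PySem.Str.len line + (if k > 0 then 1 else 0) > max
    · rw [if_pos h]
    · rw [if_neg h]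
      exact le_trans (Nat.le_succ k) (ih _ _)

-- once len_check = 1, every remaining line goes to rest
theorem foldA_phase1 (max : Int) :
    ∀ (ls part rest : List String),
      List.foldl (splitMaxStep max) (part, rest, 1) ls = (part, rest ++ ls, 1) := by
  intro ls
  induction ls with
  | nil => intro part rest; simp
  | cons line ls ih =>
    intro part rest
    simp only [List.foldl_cons]
    have hstep : splitMaxStep max (part, rest, 1) line = (part, rest ++ [line], 1) := by
      simp only [splitMaxStep]
      rw [if_neg]
      simp
    rw [hstep, ih]
    simp

theorem foldA_main (max : Int) :
    ∀ (ls part : List String) (cum : Int),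
      cum = PySem.Str.len (PySem.Str.join "," part) →
      ∃ c, List.foldl (splitMaxStep max) (part, [], 0) ls =
        (part ++ ls.take (splitMaxAltLoop max ls cum part.length - part.length),
         ls.drop (splitMaxAltLoop max ls cum part.length - part.length), c) := by
  intro ls
  induction ls with
  | nil =>
    intro part cum _
    exact ⟨0, by simp [splitMaxAltLoop]⟩
  | cons line ls ih =>
    intro part cum hcum
    have hcum' : cum + PySem.Str.len line + (if part.length > 0 then 1 else 0)
        = PySem.Str.len (PySem.Str.join "," (part ++ [line])) := by
      rw [str_join_len_append, hcum]
      by_cases hp : part = []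
      · simp [hp]
      · have hpos : 0 < part.length := List.length_pos_iff.mpr hp
        rw [if_pos hpos, if_neg hp]
    by_cases hle : PySem.Str.len (PySem.Str.join "," (part ++ [line])) ≤ max
    · -- line accepted
      have hstep : splitMaxStep max (part, [], 0) line = (part ++ [line], [], 0) := by
        simp only [splitMaxStep]
        rw [if_pos ⟨hle, by simp⟩]
      have hB : splitMaxAltLoop max (line :: ls) cum part.length
          = splitMaxAltLoop max ls (PySem.Str.len (PySem.Str.join "," (part ++ [line])))
              (part.length + 1) := by
        simp only [splitMaxAltLoop]
        rw [hcum', if_neg (not_lt.mpr hle)]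
      obtain ⟨c, hc⟩ := ih (part ++ [line])
        (PySem.Str.len (PySem.Str.join "," (part ++ [line]))) rfl
      refine ⟨c, ?_⟩
      have hge : part.length + 1 ≤ splitMaxAltLoop max ls
          (PySem.Str.len (PySem.Str.join "," (part ++ [line]))) (part.length + 1) :=
        splitMaxAltLoop_ge max ls _ _
      rw [List.foldl_cons, hstep, hc, hB]
      have hlen : (part ++ [line]).length = part.length + 1 := by simp
      rw [hlen]
      set K := splitMaxAltLoop max ls
        (PySem.Str.len (PySem.Str.join "," (part ++ [line]))) (part.length + 1) with hK
      have hm : K - part.length = (K - (part.length + 1)) + 1 := by omega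
      rw [hm]
      simp [List.take_succ_cons, List.drop_succ_cons, List.append_assoc]
    · -- line rejected: everything from here goes to rest
      have hstep : splitMaxStep max (part, [], 0) line = (part, [line], 1) := by
        simp only [splitMaxStep]
        rw [if_neg (fun hand => hle hand.1)]
        simp
      have hB : splitMaxAltLoop max (line :: ls) cum part.length = part.length := by
        simp only [splitMaxAltLoop]
        rw [hcum', if_pos (lt_of_not_ge hle)]
      refine ⟨1, ?_⟩
      rw [List.foldl_cons, hstep, foldA_phase1, hB]
      simp

-- ===== VERDICT (by name: the statement is the Claim_ definition above) =====
theorem split_max_spec : Claim_equal_split_max := by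
  intro lines max _
  unfold Spec_split_max split_max split_max_alt
  have h0 : (0 : Int) = PySem.Str.len (PySem.Str.join "," ([] : List String)) := by
    simp [PySem.Str.len_eq, PySem.Str.toList_join, PySem.Chars.join_nil]
  obtain ⟨c, hc⟩ := foldA_main max lines [] 0 h0
  simp only [List.length_nil, Nat.sub_zero, List.nil_append] at hc
  simp [hc]
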